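-- pv_equiv track=rewrite | github.com/jclapis/qsfe | Cirq/CirqNonOracles/shor.py | find_continued_fraction_convergent
-- ===== SOURCE A (Python) =====
-- def find_continued_fraction_convergent(numerator, denominator, denominator_threshold):
--     """
--     Takes in a fraction and expands it into its continued fraction form,
-- 	finding the convergent value with the largest denominator that doesn't
-- 	exceed the provided threshold.
--
--     Parameters:
--         numerator (int): The numerator of the input fraction
--         denominator (int): The denominator of the input fraction
--         denominator_threshold (int): The largest possible value that a covergent's denominator
--             is allowed to have in order to be considered a valid result
--
--     Returns:
--         The minified (irreducible) fraction representing the largest convergent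
-- 	    of the input fraction's continued form that doesn't exceed the given
-- 	    threshold. It is returned as a (numerator, denominator) tuple.
--     """
--
--     # Some background on what this step of the algorithm does:
-- 	# Any rational number can be represented by the fraction P/Q, where
-- 	# P and Q are integers. This can also be represented as what's called
-- 	# a continued fraction, which is a number of the form
-- 	# a_0 + 1/(a_1 + 1/(a_2 + 1/(a_3 + ...))).
-- 	# The terms a_i here are called the coefficients.
-- 	# Calculating the convergents is easy with an iterative process:
-- 	# set P_0 = P, Q_0 = Q
-- 	# a_i = P_i / Q_i;		<== Coefficient
-- 	# r_i = P_i % Q_i;		<== Remainder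
-- 	# P_i+1 = Q_i;
-- 	# Q_i+1 = r_i;
-- 	# When r_i == 0, this is the last term in the continued fraction.
-- 	#
-- 	# Continued fractions have things called convergents, which are
-- 	# versions of the fraction but only with i coefficients. Essentially they
-- 	# are closed and closer approximations to the full continued fraction.
-- 	# So if we call
-- 	# v_0 the first convergent, they look like this:
-- 	# v_0 = a_0
-- 	# v_1 = a_0 + 1/a_1
-- 	# v_2 = a_0 + 1/(a_1 + 1/a_2)
-- 	# v_3 = a_0 + 1/(a_1 + 1/(a_2 + 1/a_3)) ...
-- 	# For any convergent, the numerator and denominator will both be integers.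
-- 	# The math works out so that for the i-th convergent, you can easily
-- 	# calculate the numerator (n_i) and the denominator (d_i):
-- 	# n_i = a_i * n_(i-1) + n_(i-2)
-- 	# d_i = a_i * d_(i-1) + d_(i-2)
-- 	#
-- 	# Shor's algorithm finds the convergent of the fraction |X>' / N, where
-- 	# |X>' is the result of the quantum measurement and N = the total
-- 	# number of possible states in the X register, with the largest
-- 	# denominator less than B (the original number being factored).
--
--     coefficient = 0                                     # a_i
--     coefficient_calculation_numerator = numerator       # P_i
--     coefficient_calculation_denominator = denominator   # Q_i
--     coefficient_calculation_remainder = 0               # r_i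
--
--     convergent_numerator = 0                            # n_i
--     convergent_numerator_1_before = 1                   # n_(i-1)
--     convergent_numerator_2_before = 0                   # n_(i-2)
--
--     convergent_denominator = 0                          # d_i
--     convergent_denominator_1_before = 0                 # d_(i-1)
--     convergent_denominator_2_before = 1                 # d_(i-2)
--
--     while True:
--         coefficient = coefficient_calculation_numerator // coefficient_calculation_denominator
--         convergent_numerator = coefficient * convergent_numerator_1_before + convergent_numerator_2_before
--         convergent_denominator = coefficient * convergent_denominator_1_before + convergent_denominator_2_before
--
--         # We need to calculate this here to check if this was the final term
--         coefficient_calculation_remainder = coefficient_calculation_numerator % coefficient_calculation_denominator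
--
--         if convergent_denominator > denominator_threshold or coefficient_calculation_remainder == 0:
--             if convergent_denominator > denominator_threshold:
--                 # If the threshold got hit during this iteration, return the previous terms
--                 convergent_numerator = convergent_numerator_1_before
--                 convergent_denominator = convergent_denominator_1_before
--             return (convergent_numerator, convergent_denominator)
--         else:
--             # Calculate the terms that will be used for the next round
--             coefficient_calculation_numerator = coefficient_calculation_denominator
--             coefficient_calculation_denominator = coefficient_calculation_remainder
--             convergent_numerator_2_before = convergent_numerator_1_before
--             convergent_numerator_1_before = convergent_numerator
--             convergent_denominator_2_before = convergent_denominator_1_before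
--             convergent_denominator_1_before = convergent_denominator
-- ===== SOURCE B (Python) =====
-- def find_continued_fraction_convergent(numerator, denominator, denominator_threshold):
--     # Phase 1: continued-fraction coefficients via a plain Euclidean loop.
--     coefficients = []
--     p, q = numerator, denominator
--     while True:
--         coefficients.append(p // q)
--         p, q = q, p % q
--         if q == 0:
--             break
--     # Phase 2: fold the coefficients through the convergent recurrence.
--     n_prev2, n_prev1 = 0, 1
--     d_prev2, d_prev1 = 1, 0
--     for a in coefficients:
--         n = a * n_prev1 + n_prev2
--         d = a * d_prev1 + d_prev2
--         if d > denominator_threshold: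
--             return (n_prev1, d_prev1)
--         n_prev2, n_prev1 = n_prev1, n
--         d_prev2, d_prev1 = d_prev1, d
--     return (n_prev1, d_prev1)
-- ===== Notes on version B (the rewrite author's own statement) =====
-- stated objective: simpler
-- what changed: B splits A's single fused while-loop into two separate phases: a plain Euclidean loop that collects the continued-fraction coefficients into a list, then a fold of that list through the convergent recurrence with an early return at the threshold.
import Mathlib
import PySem

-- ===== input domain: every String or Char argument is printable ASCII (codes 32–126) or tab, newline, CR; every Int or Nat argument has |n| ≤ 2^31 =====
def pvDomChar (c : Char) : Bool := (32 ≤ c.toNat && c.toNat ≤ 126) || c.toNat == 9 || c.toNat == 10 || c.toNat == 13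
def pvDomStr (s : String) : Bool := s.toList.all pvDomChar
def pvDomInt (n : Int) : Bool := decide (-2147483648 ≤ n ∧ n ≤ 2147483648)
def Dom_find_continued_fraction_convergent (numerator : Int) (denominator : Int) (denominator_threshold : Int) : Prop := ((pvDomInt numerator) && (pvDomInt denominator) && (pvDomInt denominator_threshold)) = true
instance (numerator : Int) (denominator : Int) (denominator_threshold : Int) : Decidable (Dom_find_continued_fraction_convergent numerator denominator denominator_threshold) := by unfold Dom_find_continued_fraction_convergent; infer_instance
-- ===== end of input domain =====

-- B replaces A's single fused while-loop by two phases (Euclidean coefficient list, then a fold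
-- through the convergent recurrence) for clarity; same asymptotic cost, return value only.

-- termination helper for both ports: Python's mod shrinks in absolute value
theorem pv_mod_natAbs_lt (P Q : Int) (hq : Q ≠ 0) :
    (PySem.Int.mod P Q).natAbs < Q.natAbs := by
  rcases lt_or_gt_of_ne hq with h | h
  · have := PySem.Int.mod_neg_bounds (a := P) (h := h)
    omega
  · have h1 := PySem.Int.mod_nonneg (a := P) (h := h)
    have h2 := PySem.Int.mod_lt (a := P) (h := h)
    omega

-- ===== PORT A =====
-- the 'Q = 0' branch only makes the recursion total: Python raises there (excluded by Pre_),
-- and the loop itself never recurses with Q = 0.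
def pvLoopA (thr P Q n1 n2 d1 d2 : Int) : Int × Int :=
  if hq : Q = 0 then (0, 0)
  else
    let a := PySem.Int.floordiv P Q
    let n := a * n1 + n2
    let d := a * d1 + d2
    let r := PySem.Int.mod P Q
    if d > thr then (n1, d1)
    else if hr : r = 0 then (n, d)
    else pvLoopA thr Q r n n1 d d1
termination_by Q.natAbs
decreasing_by exact pv_mod_natAbs_lt P Q hq

def find_continued_fraction_convergent (numerator : Int) (denominator : Int) (denominator_threshold : Int) : Int × Int :=
  pvLoopA denominator_threshold numerator denominator 1 0 0 1

-- ===== PORT B =====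
-- phase 1: Euclidean loop collecting the coefficients ('Q = 0' guard for totality only, as above)
def pvCoeffs (P Q : Int) : List Int :=
  if hq : Q = 0 then []
  else
    let a := PySem.Int.floordiv P Q
    let r := PySem.Int.mod P Q
    if hr : r = 0 then [a] else a :: pvCoeffs Q r
termination_by Q.natAbs
decreasing_by exact pv_mod_natAbs_lt P Q hq

-- phase 2: fold the coefficient list through the convergent recurrence
def pvConv (thr : Int) : List Int → Int → Int → Int → Int → Int × Int
  | [], _, n1, _, d1 => (n1, d1)
  | a :: rest, n2, n1, d2, d1 =>
    let n := a * n1 + n2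
    let d := a * d1 + d2
    if d > thr then (n1, d1) else pvConv thr rest n1 n d1 d

def find_continued_fraction_convergent_alt (numerator : Int) (denominator : Int) (denominator_threshold : Int) : Int × Int :=
  pvConv denominator_threshold (pvCoeffs numerator denominator) 0 1 1 0

-- ===== PRECONDITION & SPEC =====
-- Python A raises ZeroDivisionError iff denominator = 0
def Pre_find_continued_fraction_convergent (numerator : Int) (denominator : Int) (denominator_threshold : Int) : Prop := denominator ≠ 0
instance (numerator : Int) (denominator : Int) (denominator_threshold : Int) : Decidable (Pre_find_continued_fraction_convergent numerator denominator denominator_threshold) := by unfold Pre_find_continued_fraction_convergent; infer_instance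
def pvWitness_find_continued_fraction_convergent : Int × Int × Int := (5, 13, 10)

def Spec_find_continued_fraction_convergent (numerator : Int) (denominator : Int) (denominator_threshold : Int) (out : Int × Int) : Prop := out = find_continued_fraction_convergent_alt numerator denominator denominator_threshold
instance (numerator : Int) (denominator : Int) (denominator_threshold : Int) (out : Int × Int) : Decidable (Spec_find_continued_fraction_convergent numerator denominator denominator_threshold out) := by unfold Spec_find_continued_fraction_convergent; infer_instance

-- ===== CLAIM (what is proved, stated in full; the proofs are below) =====
def Claim_equal_find_continued_fraction_convergent : Prop := ∀ (numerator : Int) (denominator : Int) (denominator_threshold : Int), Dom_find_continued_fraction_convergent numerator denominator denominator_threshold → Pre_find_continued_fraction_convergent numerator denominator denominator_threshold → Spec_find_continued_fraction_convergent numerator denominator denominator_threshold (find_continued_fraction_convergent numerator denominator denominator_threshold)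

-- ===== LEMMAS AND PROOFS =====

theorem pvLoopA_eq_conv (P Q : Int) (hq : Q ≠ 0) :
    ∀ thr n1 n2 d1 d2, pvLoopA thr P Q n1 n2 d1 d2 = pvConv thr (pvCoeffs P Q) n2 n1 d2 d1 := by
  induction P, Q using pvCoeffs.induct with
  | case1 P => exact absurd rfl hq
  | case2 P Q h a hr =>
    intro thr n1 n2 d1 d2
    have hr' : PySem.Int.mod P Q = 0 := hr
    rw [pvLoopA, pvCoeffs]
    simp only [dif_neg h, hr']
    split_ifs with hd <;> simp [pvConv, hd]
  | case3 P Q h a hr ih =>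
    intro thr n1 n2 d1 d2
    have hr' : PySem.Int.mod P Q ≠ 0 := hr
    rw [pvLoopA, pvCoeffs]
    simp only [dif_neg h, dif_neg hr']
    split_ifs with hd
    · simp [pvConv, hd]
    · simp only [pvConv, if_neg hd]
      exact ih hr' thr _ _ _ _

-- ===== VERDICT (by name: the statement is the Claim_ definition above) =====
theorem find_continued_fraction_convergent_spec : Claim_equal_find_continued_fraction_convergent := by
  intro n d t _ hpre
  unfold Spec_find_continued_fraction_convergent find_continued_fraction_convergent find_continued_fraction_convergent_alt
  exact pvLoopA_eq_conv n d hpre t 1 0 0 1
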